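-- pv_equiv track=rewrite | github.com/AlexisR13/Coding_Weeks-Sudoku | Resolution/resolution_optimisée.py | ligne
-- ===== SOURCE A (Python) =====
-- def ligne(grille,i,j):
--     """on retire de la case (i,j) les valeurs qui sont déjà attribuées dans la ligne i"""
--     modif_2=False
--     for k in range(len(grille)):
--         if len(grille[i][k])==1:
--             if grille[i][k][0] in grille[i][j] and (i,k)!=(i,j):
--                 grille[i][j].remove(grille[i][k][0])
--                 modif_2=True
--     return(modif_2)
-- ===== SOURCE B (Python) =====
-- def ligne(grille, i, j):
--     """on retire de la case (i,j) les valeurs qui sont deja attribuees dans la ligne i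
--     (gather-then-subtract: build the set of row singletons once, then sweep the cell;
--     same return value as A; in-place mutation of grille[i][j] differs from A only on
--     duplicate candidate values)"""
--     singles = {grille[i][k][0] for k in range(len(grille)) if len(grille[i][k]) == 1 and k != j}
--     if not singles:
--         return False
--     cell = grille[i][j]
--     modif_2 = False
--     for v in list(cell):
--         if v in singles:
--             cell.remove(v)
--             modif_2 = True
--     return modif_2
-- ===== Notes on version B (the rewrite author's own statement) =====
-- stated objective: faster
-- what changed: B gathers the row's singleton values into a set once (excluding column j) and, only if that set is nonempty, sweeps a snapshot of the target cell subtracting the set, instead of A's single row scan that tests membership in the evolving cell and removes inside the loop; equivalence is about the returned bool (in-place mutation of grille[i][j] differs from A only when the cell holds duplicate candidates).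
import Mathlib
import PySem

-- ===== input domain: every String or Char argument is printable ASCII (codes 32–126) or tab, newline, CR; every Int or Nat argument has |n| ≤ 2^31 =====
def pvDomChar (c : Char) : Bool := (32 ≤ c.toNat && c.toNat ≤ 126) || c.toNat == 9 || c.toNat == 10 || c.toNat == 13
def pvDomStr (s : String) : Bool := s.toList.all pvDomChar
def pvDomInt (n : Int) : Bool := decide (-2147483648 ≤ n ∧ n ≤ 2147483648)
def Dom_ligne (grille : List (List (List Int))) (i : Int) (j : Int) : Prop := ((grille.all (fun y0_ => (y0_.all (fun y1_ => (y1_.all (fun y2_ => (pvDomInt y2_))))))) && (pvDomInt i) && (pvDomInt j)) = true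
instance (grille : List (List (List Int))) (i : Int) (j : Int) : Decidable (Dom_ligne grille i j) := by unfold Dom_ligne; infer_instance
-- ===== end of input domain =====

-- B gathers the row's singleton values into a set once and, only if that set is nonempty,
-- sweeps a snapshot of the cell subtracting the set, instead of A's row scan testing
-- membership in the evolving cell; the proved equivalence is about the RETURNED Bool only
-- (A and B mutate grille[i][j] in place, and the mutations differ when the cell holds
-- duplicate candidate values).

-- ===== PORT A =====
def ligne (grille : List (List (List Int))) (i : Int) (j : Int) : Bool :=
  ((List.range grille.length).foldl (fun (st : List Int × Bool) (k : Nat) =>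
      let cik := PySem.List.pyGetD (PySem.List.pyGetD grille i []) (k : Int) []
      if cik.length = 1 then
        if (PySem.List.pyGetD cik 0 0) ∈ st.1 ∧ (i, (k : Int)) ≠ (i, j) then
          ((PySem.List.remove? st.1 (PySem.List.pyGetD cik 0 0)).getD st.1, true)
        else st
      else st)
    (PySem.List.pyGetD (PySem.List.pyGetD grille i []) j [], false)).2

-- ===== PORT B =====
def ligne_alt (grille : List (List (List Int))) (i : Int) (j : Int) : Bool :=
  let singles : PySem.Set Int := PySem.Set.ofList
    ((List.range grille.length).filterMap (fun (k : Nat) =>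
      if (PySem.List.pyGetD (PySem.List.pyGetD grille i []) (k : Int) []).length = 1 ∧ (k : Int) ≠ j then
        some (PySem.List.pyGetD (PySem.List.pyGetD (PySem.List.pyGetD grille i []) (k : Int) []) 0 0)
      else none))
  if singles.isEmpty then false
  else
    let cell := PySem.List.pyGetD (PySem.List.pyGetD grille i []) j []
    (cell.foldl (fun (st : List Int × Bool) v =>
        if PySem.Set.contains singles v then
          ((PySem.List.remove? st.1 v).getD st.1, true)
        else st)
      (cell, false)).2

-- ===== PRECONDITION & SPEC =====
-- Pre_ excludes exactly the inputs on which the Python A raises IndexError (and B raises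
-- there too): a nonempty grid with i out of range or row i shorter than the grid, or an
-- out-of-range j while row i contains a singleton cell (so A's 'in grille[i][j]' test is
-- reached).  The empty grid and an out-of-range j with no singleton, where A returns False,
-- are INSIDE Pre_ and B returns False there as well.
def Pre_ligne (grille : List (List (List Int))) (i : Int) (j : Int) : Prop :=
  grille = [] ∨
  (PySem.Raise.InRange grille.length i ∧
   grille.length ≤ (PySem.List.pyGetD grille i []).length ∧
   (PySem.Raise.InRange (PySem.List.pyGetD grille i []).length j ∨
    ∀ k ∈ List.range grille.length,
      (PySem.List.pyGetD (PySem.List.pyGetD grille i []) (k : Int) []).length ≠ 1))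
instance (grille : List (List (List Int))) (i : Int) (j : Int) : Decidable (Pre_ligne grille i j) := by unfold Pre_ligne; infer_instance

def pvWitness_ligne : List (List (List Int)) × Int × Int := ([[[3], [1, 3, 4], [2]]], 0, 1)

def Spec_ligne (grille : List (List (List Int))) (i : Int) (j : Int) (out : Bool) : Prop := out = ligne_alt grille i j
instance (grille : List (List (List Int))) (i : Int) (j : Int) (out : Bool) : Decidable (Spec_ligne grille i j out) := by unfold Spec_ligne; infer_instance

-- ===== CLAIM (what is proved, stated in full; the proofs are below) =====
def Claim_equal_ligne : Prop := ∀ (grille : List (List (List Int))) (i : Int) (j : Int), Dom_ligne grille i j → Pre_ligne grille i j → Spec_ligne grille i j (ligne grille i j)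

-- ===== LEMMAS AND PROOFS =====

-- named copies of the two loop bodies (definitionally equal to the lambdas in the ports)
def pvAstep (grille : List (List (List Int))) (i j : Int) : List Int × Bool → Nat → List Int × Bool :=
  fun (st : List Int × Bool) (k : Nat) =>
      let cik := PySem.List.pyGetD (PySem.List.pyGetD grille i []) (k : Int) []
      if cik.length = 1 then
        if (PySem.List.pyGetD cik 0 0) ∈ st.1 ∧ (i, (k : Int)) ≠ (i, j) then
          ((PySem.List.remove? st.1 (PySem.List.pyGetD cik 0 0)).getD st.1, true)
        else st
      else st

def pvBstep (singles : PySem.Set Int) : List Int × Bool → Int → List Int × Bool :=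
  fun (st : List Int × Bool) v =>
      if PySem.Set.contains singles v then
        ((PySem.List.remove? st.1 v).getD st.1, true)
      else st

theorem pv_foldl_true_snd {α : Type} (f : List Int × Bool → α → List Int × Bool)
    (hf : ∀ c a, (f (c, true) a).2 = true) :
    ∀ (ks : List α) (c : List Int), (ks.foldl f (c, true)).2 = true := by
  intro ks
  induction ks with
  | nil => intro c; rfl
  | cons k ks ih =>
    intro c
    have h := hf c k
    simp only [List.foldl_cons]
    rcases hfk : f (c, true) k with ⟨c', b'⟩
    have : b' = true := by rw [hfk] at h; exact h
    subst this
    exact ih c'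

theorem pvAstep_true (grille : List (List (List Int))) (i j : Int) (c : List Int) (k : Nat) :
    (pvAstep grille i j (c, true) k).2 = true := by
  unfold pvAstep; dsimp only; split_ifs <;> rfl

theorem pvBstep_true (singles : PySem.Set Int) (c : List Int) (v : Int) :
    (pvBstep singles (c, true) v).2 = true := by
  unfold pvBstep; dsimp only; split_ifs <;> rfl

-- A's fold started with flag false returns true iff some k in the list qualifies
-- against the INITIAL cell (the cell only changes once the flag has flipped to true).
theorem pv_A_fold (grille : List (List (List Int))) (i j : Int) :
    ∀ (ks : List Nat) (c : List Int),
    ((ks.foldl (pvAstep grille i j) (c, false)).2 = true) ↔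
    (∃ k ∈ ks, (PySem.List.pyGetD (PySem.List.pyGetD grille i []) (k : Int) []).length = 1 ∧
      (PySem.List.pyGetD (PySem.List.pyGetD (PySem.List.pyGetD grille i []) (k : Int) []) 0 0) ∈ c ∧
      (k : Int) ≠ j) := by
  intro ks
  induction ks with
  | nil => intro c; simp
  | cons k ks ih =>
    intro c
    rw [List.foldl_cons]
    by_cases h1 : (PySem.List.pyGetD (PySem.List.pyGetD grille i []) (k : Int) []).length = 1
    · by_cases h2 : (PySem.List.pyGetD (PySem.List.pyGetD (PySem.List.pyGetD grille i []) (k : Int) []) 0 0) ∈ c ∧ (i, (k : Int)) ≠ (i, j)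
      · have hstep : pvAstep grille i j (c, false) k =
            ((PySem.List.remove? c (PySem.List.pyGetD (PySem.List.pyGetD (PySem.List.pyGetD grille i []) (k : Int) []) 0 0)).getD c, true) := by
          unfold pvAstep
          dsimp only
          simp only [if_pos h1, if_pos h2]
        rw [hstep, pv_foldl_true_snd _ (fun c a => pvAstep_true grille i j c a)]
        constructor
        · intro _
          exact ⟨k, List.mem_cons_self, h1, h2.1, by simpa using h2.2⟩
        · intro _; rfl
      · have hstep : pvAstep grille i j (c, false) k = (c, false) := by
          unfold pvAstep
          dsimp only
          simp only [if_pos h1, if_neg h2]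
        rw [hstep, ih c]
        constructor
        · rintro ⟨k', hk', hq⟩; exact ⟨k', List.mem_cons_of_mem _ hk', hq⟩
        · rintro ⟨k', hk', hq⟩
          rcases List.mem_cons.mp hk' with h | h
          · subst h
            exact absurd ⟨hq.2.1, by simpa using hq.2.2⟩ h2
          · exact ⟨k', h, hq⟩
    · have hstep : pvAstep grille i j (c, false) k = (c, false) := by
        unfold pvAstep
        dsimp only
        simp only [if_neg h1]
      rw [hstep, ih c]
      constructor
      · rintro ⟨k', hk', hq⟩; exact ⟨k', List.mem_cons_of_mem _ hk', hq⟩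
      · rintro ⟨k', hk', hq⟩
        rcases List.mem_cons.mp hk' with h | h
        · subst h; exact absurd hq.1 h1
        · exact ⟨k', h, hq⟩

-- B's fold started with flag false returns true iff some snapshot value lies in the set
theorem pv_B_fold (singles : PySem.Set Int) :
    ∀ (vs : List Int) (c : List Int),
    ((vs.foldl (pvBstep singles) (c, false)).2 = true) ↔
    (∃ v ∈ vs, PySem.Set.contains singles v = true) := by
  intro vs
  induction vs with
  | nil => intro c; simp
  | cons v vs ih =>
    intro c
    rw [List.foldl_cons]
    by_cases h : PySem.Set.contains singles v = true
    · have hstep : pvBstep singles (c, false) v = ((PySem.List.remove? c v).getD c, true) := by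
        unfold pvBstep
        dsimp only
        rw [if_pos h]
      rw [hstep, pv_foldl_true_snd _ (fun c a => pvBstep_true singles c a)]
      constructor
      · intro _; exact ⟨v, List.mem_cons_self, h⟩
      · intro _; rfl
    · have hstep : pvBstep singles (c, false) v = (c, false) := by
        unfold pvBstep
        dsimp only
        rw [if_neg h]
      rw [hstep, ih c]
      constructor
      · rintro ⟨v', hv', hq⟩; exact ⟨v', List.mem_cons_of_mem _ hv', hq⟩
      · rintro ⟨v', hv', hq⟩
        rcases List.mem_cons.mp hv' with rfl | hm
        · exact absurd hq h
        · exact ⟨v', hm, hq⟩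

-- ===== VERDICT (by name: the statement is the Claim_ definition above) =====
theorem ligne_spec : Claim_equal_ligne := by
  intro grille i j _ _
  unfold Spec_ligne
  set singles : PySem.Set Int := PySem.Set.ofList
    ((List.range grille.length).filterMap (fun (k : Nat) =>
      if (PySem.List.pyGetD (PySem.List.pyGetD grille i []) (k : Int) []).length = 1 ∧ (k : Int) ≠ j then
        some (PySem.List.pyGetD (PySem.List.pyGetD (PySem.List.pyGetD grille i []) (k : Int) []) 0 0)
      else none)) with hsingles
  set cell := PySem.List.pyGetD (PySem.List.pyGetD grille i []) j [] with hcell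
  have hAeq : ligne grille i j =
      ((List.range grille.length).foldl (pvAstep grille i j) (cell, false)).2 := rfl
  have hAiff : (ligne grille i j = true) ↔
      (∃ v ∈ cell, PySem.Set.contains singles v = true) := by
    rw [hAeq, pv_A_fold grille i j (List.range grille.length) cell]
    constructor
    · rintro ⟨k, hk, h1, hmem, hne⟩
      refine ⟨_, hmem, ?_⟩
      simp only [hsingles, PySem.Set.contains, List.contains_iff_mem, PySem.Set.mem_ofList,
        List.mem_filterMap]
      exact ⟨k, hk, by rw [if_pos ⟨h1, hne⟩]⟩
    · rintro ⟨v, hv, hc⟩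
      simp only [hsingles, PySem.Set.contains, List.contains_iff_mem, PySem.Set.mem_ofList,
        List.mem_filterMap] at hc
      rcases hc with ⟨k, hk, hif⟩
      by_cases hq : (PySem.List.pyGetD (PySem.List.pyGetD grille i []) (k : Int) []).length = 1 ∧ (k : Int) ≠ j
      · rw [if_pos hq] at hif
        cases hif
        exact ⟨k, hk, hq.1, hv, hq.2⟩
      · rw [if_neg hq] at hif; cases hif
  have hBeq : ligne_alt grille i j =
      if singles.isEmpty then false else (cell.foldl (pvBstep singles) (cell, false)).2 := rfl
  by_cases hemp : singles.isEmpty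
  · rw [hBeq, if_pos hemp]
    have : ¬ ∃ v ∈ cell, PySem.Set.contains singles v = true := by
      rintro ⟨v, _, hc⟩
      rw [List.isEmpty_iff] at hemp
      simp [hemp, PySem.Set.contains] at hc
    simpa [this] using (Bool.not_eq_true _).mp (fun h => this (hAiff.mp h))
  · rw [hBeq, if_neg hemp, Bool.eq_iff_iff, pv_B_fold singles cell cell]
    exact hAiff
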